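-- pv_equiv track=rewrite | github.com/pypi-data/pypi-mirror-107 | packages/percstat/percstat-0.0.0a14.tar.gz/percstat-0.0.0a14/percstat/percstat.py | P_cond
-- ===== SOURCE A (Python) =====
-- def P_cond(li,cond):
--     c2=0;
--     c3=0;
--     if "&" in cond:
--         cond2=cond.split("&")
--         for cond3 in cond2:
--             if ">=" in cond3:
--                 c=cond3.split("=")
--                 c2=int(c[1])
--                 for i in li:
--                     if i[0]>=c2:
--                         c3+=i[1]
--             elif ">" in cond3:
--                 c=cond3.split(">")
--                 c2=int(c[1])
--                 for i in li:
--                     if i[0]>c2: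
--                         c3+=i[1]
--             elif "<=" in cond3:
--                 c=cond3.split("=")
--                 c2=int(c[1])
--                 for i in li:
--                     if i[0]<=c2:
--                         c3+=i[1]
--             elif "<" in cond3:
--                 c=cond3.split("<")
--                 c2=int(c[1])
--                 for i in li:
--                     if i[0]<c2:
--                         c3+=i[1]
--             elif "=" in cond3:
--                 c=cond3.split("=")
--                 c2=int(c[1])
--                 for i in li:
--                     if i[0]==c2:
--                         c3+=i[1]
--     else:
--         cond2=cond
--         if ">=" in cond2:
--             c=cond.split("=")
--             c2=int(c[1])
--             for i in li:
--                 if i[0]>=c2: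
--                     c3+=i[1]
--         elif ">" in cond2:
--             c=cond.split(">")
--             c2=int(c[1])
--             for i in li:
--                 if i[0]>c2:
--                     c3+=i[1]
--         elif "<=" in cond2:
--             c=cond.split("=")
--             c2=int(c[1])
--             for i in li:
--                 if i[0]<=c2:
--                     c3+=i[1]
--         elif "<" in cond2:
--             c=cond.split("<")
--             c2=int(c[1])
--             for i in li:
--                 if i[0]<c2:
--                     c3+=i[1]
--         elif "=" in cond2:
--             c=cond.split("=")
--             c2=int(c[1])
--             for i in li:
--                 if i[0]==c2:
--                     c3+=i[1]
--     return c3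
-- ===== SOURCE B (Python) =====
-- # B: parse the condition(s) into (op, threshold) specs first; if any, sort the
-- # rows by key once, build a prefix-sum table of the weights, and answer every
-- # spec with binary-searched boundaries into that table instead of rescanning
-- # the whole list per condition.
--
-- def _lower(keys, pred):
--     # first index i with not pred(keys[i]); keys ascending, pred downward-closed
--     lo, hi = 0, len(keys)
--     while lo < hi:
--         mid = (lo + hi) // 2
--         if pred(keys[mid]):
--             lo = mid + 1
--         else:
--             hi = mid
--     return lo
--
-- def P_cond(li, cond):
--     specs = []
--     for sub in (cond.split("&") if "&" in cond else [cond]):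
--         if ">=" in sub:
--             specs.append((0, int(sub.split("=")[1])))
--         elif ">" in sub:
--             specs.append((1, int(sub.split(">")[1])))
--         elif "<=" in sub:
--             specs.append((2, int(sub.split("=")[1])))
--         elif "<" in sub:
--             specs.append((3, int(sub.split("<")[1])))
--         elif "=" in sub:
--             specs.append((4, int(sub.split("=")[1])))
--     if not specs:
--         return 0
--     rows = sorted(li, key=lambda r: r[0])
--     keys = [r[0] for r in rows]
--     pref = [0]
--     s = 0
--     for r in rows:
--         s += r[1]
--         pref.append(s)
--     total = s
--
--     def below(pred):
--         # total weight of the rows whose key satisfies the downward-closed pred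
--         return pref[_lower(keys, pred)]
--
--     out = 0
--     for op, t in specs:
--         if op == 0:
--             out += total - below(lambda k: k < t)
--         elif op == 1:
--             out += total - below(lambda k: k <= t)
--         elif op == 2:
--             out += below(lambda k: k <= t)
--         elif op == 3:
--             out += below(lambda k: k < t)
--         elif op == 4:
--             out += below(lambda k: k <= t) - below(lambda k: k < t)
--     return out
-- ===== Notes on version B (the rewrite author's own statement) =====
-- stated objective: alternative
-- what changed: A rescans the whole list once per sub-condition through ten duplicated operator-specific loops; B parses the condition(s) into (op, threshold) specs first, then sorts the rows by key once, builds a prefix-sum table of the weights, and answers each spec as a difference of two prefix sums located by hand-written binary search.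
-- outside the precondition, e.g. on P_cond([[5]], '<3'): A returns 0, B raises IndexError
import Mathlib
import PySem

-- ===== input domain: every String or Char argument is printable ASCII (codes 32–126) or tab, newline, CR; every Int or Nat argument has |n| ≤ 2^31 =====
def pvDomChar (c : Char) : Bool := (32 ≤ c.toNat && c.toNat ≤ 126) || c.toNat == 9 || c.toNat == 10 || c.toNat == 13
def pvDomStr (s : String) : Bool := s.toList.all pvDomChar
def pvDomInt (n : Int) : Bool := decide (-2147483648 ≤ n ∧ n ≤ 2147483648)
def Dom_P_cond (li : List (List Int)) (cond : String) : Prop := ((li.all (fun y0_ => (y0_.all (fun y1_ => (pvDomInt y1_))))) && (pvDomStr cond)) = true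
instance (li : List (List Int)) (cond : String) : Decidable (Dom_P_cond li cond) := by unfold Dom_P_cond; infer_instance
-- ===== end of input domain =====

-- B replaces A's per-condition rescans of the list with one sort of the rows by
-- key, a prefix-sum table of the weights, and a binary-searched boundary per
-- sub-condition (objective: alternative). Outside Pre_ one of the two Pythons
-- raises (ValueError/IndexError); there the ports use a 0 default at the very
-- spot Python raises.

-- shared primitive transliterations: i[k] (IndexError → default, outside Pre_)
-- and int(c.split(sep)[1]) (ValueError/IndexError → default, outside Pre_)
def pvG (i : List Int) (k : Int) : Int := (PySem.List.pyGet? i k).getD 0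
-- s.split(sep) for the nonempty literal separators used here (split? is some for sep ≠ "")
def pvSplit (s sep : String) : List String := (PySem.Str.split? s sep).getD []
def pvThr (s sep : String) : Int :=
  (PySem.Int.ofStr? ((PySem.List.pyGet? (pvSplit s sep) 1).getD "")).getD 0

-- ===== PORT A =====
-- the if/elif chain of A appears verbatim twice in the Python ("&" branch and
-- else branch); it is transcribed once here and used at both places
def pvStepA (li : List (List Int)) (st : Int × Int) (cond3 : String) : Int × Int :=
  if PySem.Str.isIn ">=" cond3 then
    let c2 := pvThr cond3 "="
    (c2, li.foldl (fun c3 i => if pvG i 0 ≥ c2 then c3 + pvG i 1 else c3) st.2)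
  else if PySem.Str.isIn ">" cond3 then
    let c2 := pvThr cond3 ">"
    (c2, li.foldl (fun c3 i => if pvG i 0 > c2 then c3 + pvG i 1 else c3) st.2)
  else if PySem.Str.isIn "<=" cond3 then
    let c2 := pvThr cond3 "="
    (c2, li.foldl (fun c3 i => if pvG i 0 ≤ c2 then c3 + pvG i 1 else c3) st.2)
  else if PySem.Str.isIn "<" cond3 then
    let c2 := pvThr cond3 "<"
    (c2, li.foldl (fun c3 i => if pvG i 0 < c2 then c3 + pvG i 1 else c3) st.2)
  else if PySem.Str.isIn "=" cond3 then
    let c2 := pvThr cond3 "="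
    (c2, li.foldl (fun c3 i => if pvG i 0 = c2 then c3 + pvG i 1 else c3) st.2)
  else st

def P_cond (li : List (List Int)) (cond : String) : Int :=
  if PySem.Str.isIn "&" cond then
    ((pvSplit cond "&").foldl (pvStepA li) (0, 0)).2
  else
    (pvStepA li (0, 0) cond).2

-- ===== PORT B =====
-- B's _lower: the hand-written while loop, transcribed as recursion on hi - lo
def pvLowerGo (keys : List Int) (pred : Int → Bool) (lo hi : Nat) : Nat :=
  if lo < hi then
    let mid := (lo + hi) / 2
    if pred (keys.getD mid 0) then pvLowerGo keys pred (mid + 1) hi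
    else pvLowerGo keys pred lo mid
  else lo
termination_by hi - lo
decreasing_by all_goals omega

def pvLower (keys : List Int) (pred : Int → Bool) : Nat :=
  pvLowerGo keys pred 0 keys.length

def P_cond_alt (li : List (List Int)) (cond : String) : Int :=
  let specs := (if PySem.Str.isIn "&" cond then pvSplit cond "&" else [cond]).foldl
    (fun acc sub =>
      if PySem.Str.isIn ">=" sub then acc ++ [((0 : Int), pvThr sub "=")]
      else if PySem.Str.isIn ">" sub then acc ++ [((1 : Int), pvThr sub ">")]
      else if PySem.Str.isIn "<=" sub then acc ++ [((2 : Int), pvThr sub "=")]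
      else if PySem.Str.isIn "<" sub then acc ++ [((3 : Int), pvThr sub "<")]
      else if PySem.Str.isIn "=" sub then acc ++ [((4 : Int), pvThr sub "=")]
      else acc) ([] : List (Int × Int))
  if specs = [] then 0
  else
    let rows := PySem.List.sorted li (fun r => pvG r 0) false
    let keys := rows.map (fun r => pvG r 0)
    let ps := rows.foldl (fun st r => (st.1 ++ [st.2 + pvG r 1], st.2 + pvG r 1))
                (([0] : List Int), (0 : Int))
    let pref := ps.1
    let total := ps.2
    let below := fun (pred : Int → Bool) => pref.getD (pvLower keys pred) 0
    specs.foldl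
      (fun out spec =>
        let op := spec.1
        let t := spec.2
        if op = 0 then out + (total - below (fun k => decide (k < t)))
        else if op = 1 then out + (total - below (fun k => decide (k ≤ t)))
        else if op = 2 then out + below (fun k => decide (k ≤ t))
        else if op = 3 then out + below (fun k => decide (k < t))
        else if op = 4 then out + (below (fun k => decide (k ≤ t)) - below (fun k => decide (k < t)))
        else out) 0

-- ===== PRECONDITION & SPEC =====
-- a sub-condition does not raise ValueError in its taken branch: int(c[1]) parses
def pvSubOk (s : String) : Bool :=
  if PySem.Str.isIn ">=" s then (PySem.Int.ofStr? ((PySem.List.pyGet? (pvSplit s "=") 1).getD "")).isSome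
  else if PySem.Str.isIn ">" s then (PySem.Int.ofStr? ((PySem.List.pyGet? (pvSplit s ">") 1).getD "")).isSome
  else if PySem.Str.isIn "<=" s then (PySem.Int.ofStr? ((PySem.List.pyGet? (pvSplit s "=") 1).getD "")).isSome
  else if PySem.Str.isIn "<" s then (PySem.Int.ofStr? ((PySem.List.pyGet? (pvSplit s "<") 1).getD "")).isSome
  else if PySem.Str.isIn "=" s then (PySem.Int.ofStr? ((PySem.List.pyGet? (pvSplit s "=") 1).getD "")).isSome
  else true

-- s contains some comparison operator (some branch of A's chain fires)
def pvHasOp (s : String) : Bool :=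
  PySem.Str.isIn ">=" s || PySem.Str.isIn ">" s || PySem.Str.isIn "<=" s ||
  PySem.Str.isIn "<" s || PySem.Str.isIn "=" s

-- Pre_ excludes the inputs where Python A raises ValueError (a taken operator
-- branch whose int(c[1]) is not an int literal) and, when some sub-condition
-- carries an operator, requires every row to hold its key and weight
-- (length ≥ 2): A indexes rows lazily and so happens to return on malformed
-- short rows its loops never reach, while B then reads every row once up front
-- and raises IndexError there.
def Pre_P_cond (li : List (List Int)) (cond : String) : Prop :=
  (∀ s ∈ (if PySem.Str.isIn "&" cond then pvSplit cond "&" else [cond]), pvSubOk s = true) ∧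
  ((∃ s ∈ (if PySem.Str.isIn "&" cond then pvSplit cond "&" else [cond]), pvHasOp s = true) →
    ∀ r ∈ li, 2 ≤ r.length)
instance (li : List (List Int)) (cond : String) : Decidable (Pre_P_cond li cond) := by
  unfold Pre_P_cond; infer_instance

def pvWitness_P_cond : List (List Int) × String := ([[3, 10], [5, 7]], ">=4&<2")

def Spec_P_cond (li : List (List Int)) (cond : String) (out : Int) : Prop := out = P_cond_alt li cond
instance (li : List (List Int)) (cond : String) (out : Int) : Decidable (Spec_P_cond li cond out) := by unfold Spec_P_cond; infer_instance

-- ===== CLAIM (what is proved, stated in full; the proofs are below) =====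
def Claim_equal_P_cond : Prop := ∀ (li : List (List Int)) (cond : String), Dom_P_cond li cond → Pre_P_cond li cond → Spec_P_cond li cond (P_cond li cond)

-- ===== LEMMAS AND PROOFS =====

-- A's inner accumulation loop is a filter-map-sum
theorem foldl_if_eq_sum (li : List (List Int)) (P : Int → Prop) [DecidablePred P] :
    ∀ c3 : Int,
      li.foldl (fun c3 i => if P (pvG i 0) then c3 + pvG i 1 else c3) c3
        = c3 + ((li.filter (fun row => decide (P (pvG row 0)))).map (fun row => pvG row 1)).sum := by
  induction li with
  | nil => intro c3; simp
  | cons r rest ih =>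
    intro c3
    by_cases h : P (pvG r 0)
    · simp [h, ih]; ring
    · simp [h, ih]

-- B's prefix-sum loop: the table is the list of partial sums of the weights
theorem pref_spec (rows : List (List Int)) :
    rows.foldl (fun st r => (st.1 ++ [st.2 + pvG r 1], st.2 + pvG r 1))
        (([0] : List Int), (0 : Int))
      = ((List.range (rows.length + 1)).map
           (fun j => ((rows.take j).map (fun r => pvG r 1)).sum),
         (rows.map (fun r => pvG r 1)).sum) := by
  induction rows using List.reverseRecOn with
  | nil => simp
  | append_singleton rows r ih =>
    rw [List.foldl_append, ih]
    simp only [List.foldl_cons, List.foldl_nil, Prod.mk.injEq]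
    refine ⟨?_, by simp⟩
    conv_rhs => rw [List.length_append, List.length_singleton, List.range_succ, List.map_append]
    congr 1
    · apply List.map_congr_left
      intro j hj
      rw [List.mem_range] at hj
      rw [List.take_append_of_le_length (by omega)]
    · simp [List.take_of_length_le]

-- binary-search correctness: with a boundary-compatible predicate the loop
-- returns the boundary index
theorem lowerGo_spec (keys : List Int) (pred : Int → Bool)
    (hmono : ∀ p q : Nat, ∀ (hp : p < keys.length) (hq : q < keys.length),
        p ≤ q → pred keys[q] = true → pred keys[p] = true) :
    ∀ n lo hi, hi - lo ≤ n → lo ≤ hi → hi ≤ keys.length →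
      (∀ j, j < lo → ∀ (hj : j < keys.length), pred keys[j] = true) →
      (∀ j, hi ≤ j → ∀ (hj : j < keys.length), pred keys[j] = false) →
      pvLowerGo keys pred lo hi ≤ keys.length ∧
      (∀ j (hj : j < keys.length), j < pvLowerGo keys pred lo hi → pred keys[j] = true) ∧
      (∀ j (hj : j < keys.length), pvLowerGo keys pred lo hi ≤ j → pred keys[j] = false) := by
  intro n
  induction n with
  | zero =>
    intro lo hi h0 hle hlen h1 h2
    have : lo = hi := by omega
    subst this
    rw [pvLowerGo, if_neg (by omega)]
    exact ⟨by omega, fun j hj hjlo => h1 j hjlo hj, fun j hj hloj => h2 j hloj hj⟩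
  | succ n ih =>
    intro lo hi h0 hle hlen h1 h2
    by_cases hlt : lo < hi
    · rw [pvLowerGo, if_pos hlt]
      simp only
      have hmidlen : (lo + hi) / 2 < keys.length := by omega
      rw [List.getD_eq_getElem keys 0 hmidlen]
      by_cases hp : pred keys[(lo + hi) / 2] = true
      · rw [if_pos hp]
        exact ih ((lo + hi) / 2 + 1) hi (by omega) (by omega) hlen
          (fun j hj hjl => hmono j ((lo + hi) / 2) hjl hmidlen (by omega) hp) h2
      · rw [if_neg hp]
        exact ih lo ((lo + hi) / 2) (by omega) (by omega) (by omega) h1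
          (fun j hj hjl => by
            by_contra hne
            exact hp (hmono ((lo + hi) / 2) j hmidlen hjl hj
              (by revert hne; cases pred keys[j] <;> simp)))
    · have : lo = hi := by omega
      subst this
      rw [pvLowerGo, if_neg (by omega)]
      exact ⟨by omega, fun j hj hjlo => h1 j hjlo hj, fun j hj hloj => h2 j hloj hj⟩

-- a boundary index turns the filtered rows into a take-prefix of the sorted rows
theorem filter_eq_take (rows : List (List Int)) (P : List Int → Bool) (r : Nat)
    (hr : r ≤ rows.length)
    (h1 : ∀ j (hj : j < rows.length), j < r → P rows[j] = true)
    (h2 : ∀ j (hj : j < rows.length), r ≤ j → P rows[j] = false) :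
    rows.filter P = rows.take r := by
  conv_lhs => rw [← List.take_append_drop r rows]
  rw [List.filter_append]
  rw [List.filter_eq_self.mpr, List.filter_eq_nil_iff.mpr, List.append_nil]
  · intro a ha
    obtain ⟨i, hi, rfl⟩ := List.mem_iff_getElem.mp ha
    rw [List.getElem_drop]
    have hlen : r + i < rows.length := by
      have := List.length_drop (l := rows) (i := r) ▸ hi; omega
    simp [h2 (r + i) hlen (by omega)]
  · intro a ha
    obtain ⟨i, hi, rfl⟩ := List.mem_take_iff_getElem.mp ha
    exact h1 i (by omega) (by omega)

theorem sum_filter_not (l : List (List Int)) (p : List Int → Bool) :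
    ((l.filter (fun x => !p x)).map (fun r => pvG r 1)).sum
      = (l.map (fun r => pvG r 1)).sum - ((l.filter p).map (fun r => pvG r 1)).sum := by
  have h := List.Perm.sum_eq (List.Perm.map (fun r => pvG r 1) (List.filter_append_perm p l))
  rw [List.map_append, List.sum_append] at h
  omega

theorem sum_filter_le_split (l : List (List Int)) (t : Int) :
    ((l.filter (fun row => decide (pvG row 0 ≤ t))).map (fun r => pvG r 1)).sum
      = ((l.filter (fun row => decide (pvG row 0 < t))).map (fun r => pvG r 1)).sum
        + ((l.filter (fun row => decide (pvG row 0 = t))).map (fun r => pvG r 1)).sum := by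
  induction l with
  | nil => simp
  | cons x l ih =>
    rcases lt_trichotomy (pvG x 0) t with h | h | h
    · simp [h, le_of_lt h, ne_of_lt h, ih]; ring
    · simp [h, ih]; ring
    · simp [not_le_of_gt h, not_lt_of_gt h, ne_of_gt h, ih]

-- the central fact: B's prefix-sum lookup below(pred) is the weight-sum of the
-- rows of li whose key satisfies the downward-closed pred
theorem below_eq (li : List (List Int)) (pred : Int → Bool)
    (hdc : ∀ a b : Int, a ≤ b → pred b = true → pred a = true) :
    (((PySem.List.sorted li (fun r => pvG r 0) false).foldl
        (fun st r => (st.1 ++ [st.2 + pvG r 1], st.2 + pvG r 1))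
        (([0] : List Int), (0 : Int))).1).getD
      (pvLower ((PySem.List.sorted li (fun r => pvG r 0) false).map (fun r => pvG r 0)) pred) 0
      = ((li.filter (fun row => pred (pvG row 0))).map (fun r => pvG r 1)).sum := by
  set rows := PySem.List.sorted li (fun r => pvG r 0) false with hrows
  set keys := rows.map (fun r => pvG r 0) with hkeys
  have hklen : keys.length = rows.length := by simp [hkeys]
  have hrl : rows.length = li.length := by rw [hrows, PySem.List.length_sorted]
  have hmono : ∀ p q : Nat, ∀ (hp : p < keys.length) (hq : q < keys.length),
      p ≤ q → pred keys[q] = true → pred keys[p] = true := by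
    intro p q hp hq hpq h
    have hk : keys[p] ≤ keys[q] := by
      simp only [hkeys, List.getElem_map]
      exact PySem.List.key_sorted_getElem_mono li (fun r => pvG r 0) hpq
        (by simp only [PySem.List.length_sorted]; omega)
    exact hdc _ _ hk h
  obtain ⟨hrle, hb1, hb2⟩ := lowerGo_spec keys pred hmono keys.length 0 keys.length
    (by omega) (by omega) (le_refl _)
    (fun j hj hjl => absurd hj (by omega)) (fun j hj hjl => absurd hj (by omega))
  set r := pvLower keys pred with hr
  have hrr : pvLowerGo keys pred 0 keys.length = r := rfl
  rw [hrr] at hrle hb1 hb2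
  rw [pref_spec]
  have hrlen : r < (List.range (rows.length + 1)).length := by simp; omega
  rw [List.getD_eq_getElem _ 0 (by simpa using hrlen), List.getElem_map, List.getElem_range]
  have hft : rows.filter (fun row => pred (pvG row 0)) = rows.take r := by
    apply filter_eq_take rows _ r (by omega)
    · intro j hj hjr
      have := hb1 j (by omega) hjr
      simpa [hkeys, List.getElem_map] using this
    · intro j hj hjr
      have := hb2 j (by omega) hjr
      simpa [hkeys, List.getElem_map] using this
  rw [← hft]
  exact List.Perm.sum_eq (List.Perm.map _ (List.Perm.filter _ (PySem.List.sorted_perm li _ false)))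

-- the accumulated total is the weight-sum of all rows of li
theorem total_eq (li : List (List Int)) :
    (((PySem.List.sorted li (fun r => pvG r 0) false).foldl
        (fun st r => (st.1 ++ [st.2 + pvG r 1], st.2 + pvG r 1))
        (([0] : List Int), (0 : Int))).2)
      = (li.map (fun r => pvG r 1)).sum := by
  rw [pref_spec]
  exact List.Perm.sum_eq (List.Perm.map _ (PySem.List.sorted_perm li _ false))

-- proof-side names for B's intermediate values (definitionally equal to the
-- let-bound locals of P_cond_alt)
def pvFoldPS (li : List (List Int)) : List Int × Int :=
  (PySem.List.sorted li (fun r => pvG r 0) false).foldl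
    (fun st r => (st.1 ++ [st.2 + pvG r 1], st.2 + pvG r 1)) (([0] : List Int), (0 : Int))

def pvBelow (li : List (List Int)) (pred : Int → Bool) : Int :=
  (pvFoldPS li).1.getD
    (pvLower ((PySem.List.sorted li (fun r => pvG r 0) false).map (fun r => pvG r 0)) pred) 0

def pvBStep (li : List (List Int)) : Int → String → Int := fun out sub =>
  if PySem.Str.isIn ">=" sub then
    out + ((pvFoldPS li).2 - pvBelow li (fun k => decide (k < pvThr sub "=")))
  else if PySem.Str.isIn ">" sub then
    out + ((pvFoldPS li).2 - pvBelow li (fun k => decide (k ≤ pvThr sub ">")))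
  else if PySem.Str.isIn "<=" sub then
    out + pvBelow li (fun k => decide (k ≤ pvThr sub "="))
  else if PySem.Str.isIn "<" sub then
    out + pvBelow li (fun k => decide (k < pvThr sub "<"))
  else if PySem.Str.isIn "=" sub then
    out + (pvBelow li (fun k => decide (k ≤ pvThr sub "="))
           - pvBelow li (fun k => decide (k < pvThr sub "=")))
  else out

-- one sub-condition: A's chain step adds exactly B's prefix-sum contribution
theorem step_eq (li : List (List Int)) (st : Int × Int) (s : String) :
    (pvStepA li st s).2 = pvBStep li st.2 s := by
  unfold pvStepA pvBStep pvBelow pvFoldPS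
  by_cases h1 : PySem.Str.isIn ">=" s = true
  · simp only [h1, if_pos]
    rw [foldl_if_eq_sum li (fun x => x ≥ pvThr s "=") st.2,
        below_eq li (fun k => decide (k < pvThr s "=")) (fun a b hab hb => by simp_all; omega),
        total_eq]
    have hc : li.filter (fun row => decide (pvG row 0 ≥ pvThr s "="))
        = li.filter (fun x => !decide (pvG x 0 < pvThr s "=")) := by
      apply List.filter_congr
      intro x _
      rcases lt_or_ge (pvG x 0) (pvThr s "=") with h | h
      · simp [h, not_le.mpr h]
      · simp [h, not_lt.mpr h]
    rw [hc, sum_filter_not li (fun row => decide (pvG row 0 < pvThr s "="))]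
  · simp only [h1, Bool.false_eq_true, if_neg, not_false_eq_true]
    by_cases h2 : PySem.Str.isIn ">" s = true
    · simp only [h2, if_pos]
      rw [foldl_if_eq_sum li (fun x => x > pvThr s ">") st.2,
          below_eq li (fun k => decide (k ≤ pvThr s ">")) (fun a b hab hb => by simp_all; omega),
          total_eq]
      have hc : li.filter (fun row => decide (pvG row 0 > pvThr s ">"))
          = li.filter (fun x => !decide (pvG x 0 ≤ pvThr s ">")) := by
        apply List.filter_congr
        intro x _
        rcases le_or_gt (pvG x 0) (pvThr s ">") with h | h
        · simp [h, not_lt.mpr h]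
        · simp [h, not_le.mpr h]
      rw [hc, sum_filter_not li (fun row => decide (pvG row 0 ≤ pvThr s ">"))]
    · simp only [h2, Bool.false_eq_true, if_neg, not_false_eq_true]
      by_cases h3 : PySem.Str.isIn "<=" s = true
      · simp only [h3, if_pos]
        rw [foldl_if_eq_sum li (fun x => x ≤ pvThr s "=") st.2,
            below_eq li (fun k => decide (k ≤ pvThr s "=")) (fun a b hab hb => by simp_all; omega)]
      · simp only [h3, Bool.false_eq_true, if_neg, not_false_eq_true]
        by_cases h4 : PySem.Str.isIn "<" s = true
        · simp only [h4, if_pos]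
          rw [foldl_if_eq_sum li (fun x => x < pvThr s "<") st.2,
              below_eq li (fun k => decide (k < pvThr s "<")) (fun a b hab hb => by simp_all; omega)]
        · simp only [h4, Bool.false_eq_true, if_neg, not_false_eq_true]
          by_cases h5 : PySem.Str.isIn "=" s = true
          · simp only [h5, if_pos]
            rw [foldl_if_eq_sum li (fun x => x = pvThr s "=") st.2,
                below_eq li (fun k => decide (k ≤ pvThr s "=")) (fun a b hab hb => by simp_all; omega),
                below_eq li (fun k => decide (k < pvThr s "=")) (fun a b hab hb => by simp_all; omega),
                sum_filter_le_split li (pvThr s "=")]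
            ring
          · simp only [h5, Bool.false_eq_true, if_neg, not_false_eq_true]

-- folding A's pair-state chain equals folding B's scalar contributions
theorem foldl_pair_snd (li : List (List Int)) (f : Int → String → Int)
    (h : ∀ st s, (pvStepA li st s).2 = f st.2 s) :
    ∀ (parts : List String) (st : Int × Int),
      (parts.foldl (pvStepA li) st).2 = parts.foldl f st.2 := by
  intro parts
  induction parts with
  | nil => intro st; rfl
  | cons s rest ih =>
    intro st
    simp only [List.foldl_cons]
    rw [ih, h]

-- B's parse of one sub-condition, and B's per-spec summation step
def pvSpec1 (sub : String) : List (Int × Int) :=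
  if PySem.Str.isIn ">=" sub then [((0 : Int), pvThr sub "=")]
  else if PySem.Str.isIn ">" sub then [((1 : Int), pvThr sub ">")]
  else if PySem.Str.isIn "<=" sub then [((2 : Int), pvThr sub "=")]
  else if PySem.Str.isIn "<" sub then [((3 : Int), pvThr sub "<")]
  else if PySem.Str.isIn "=" sub then [((4 : Int), pvThr sub "=")]
  else []

def pvGStep (li : List (List Int)) : Int → (Int × Int) → Int := fun out spec =>
  if spec.1 = 0 then out + ((pvFoldPS li).2 - pvBelow li (fun k => decide (k < spec.2)))
  else if spec.1 = 1 then out + ((pvFoldPS li).2 - pvBelow li (fun k => decide (k ≤ spec.2)))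
  else if spec.1 = 2 then out + pvBelow li (fun k => decide (k ≤ spec.2))
  else if spec.1 = 3 then out + pvBelow li (fun k => decide (k < spec.2))
  else if spec.1 = 4 then out + (pvBelow li (fun k => decide (k ≤ spec.2))
                                 - pvBelow li (fun k => decide (k < spec.2)))
  else out

-- B's spec-building loop is a flatMap over the sub-conditions
theorem specs_fold_eq (parts : List String) :
    ∀ acc : List (Int × Int),
      parts.foldl
        (fun acc sub =>
          if PySem.Str.isIn ">=" sub then acc ++ [((0 : Int), pvThr sub "=")]
          else if PySem.Str.isIn ">" sub then acc ++ [((1 : Int), pvThr sub ">")]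
          else if PySem.Str.isIn "<=" sub then acc ++ [((2 : Int), pvThr sub "=")]
          else if PySem.Str.isIn "<" sub then acc ++ [((3 : Int), pvThr sub "<")]
          else if PySem.Str.isIn "=" sub then acc ++ [((4 : Int), pvThr sub "=")]
          else acc) acc
      = acc ++ parts.flatMap pvSpec1 := by
  induction parts with
  | nil => intro acc; simp
  | cons sub rest ih =>
    intro acc
    simp only [List.foldl_cons, List.flatMap_cons]
    rw [ih]
    have hstep : (if PySem.Str.isIn ">=" sub then acc ++ [((0 : Int), pvThr sub "=")]
          else if PySem.Str.isIn ">" sub then acc ++ [((1 : Int), pvThr sub ">")]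
          else if PySem.Str.isIn "<=" sub then acc ++ [((2 : Int), pvThr sub "=")]
          else if PySem.Str.isIn "<" sub then acc ++ [((3 : Int), pvThr sub "<")]
          else if PySem.Str.isIn "=" sub then acc ++ [((4 : Int), pvThr sub "=")]
          else acc) = acc ++ pvSpec1 sub := by
      unfold pvSpec1
      split_ifs <;> simp
    rw [hstep, List.append_assoc]

-- summing one parsed spec is B's per-sub-condition contribution
theorem gstep_single (li : List (List Int)) (sub : String) :
    ∀ out : Int, (pvSpec1 sub).foldl (pvGStep li) out = pvBStep li out sub := by
  intro out
  unfold pvSpec1 pvBStep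
  split_ifs <;> simp [pvGStep]

-- folding B's per-spec step over all parsed specs is folding the
-- per-sub-condition contributions over the sub-conditions
theorem gfold_flatMap (li : List (List Int)) (parts : List String) :
    ∀ out : Int,
      (parts.flatMap pvSpec1).foldl (pvGStep li) out = parts.foldl (pvBStep li) out := by
  induction parts with
  | nil => intro out; rfl
  | cons sub rest ih =>
    intro out
    simp only [List.flatMap_cons, List.foldl_append, List.foldl_cons]
    rw [gstep_single, ih]

theorem P_cond_eq_alt (li : List (List Int)) (cond : String) :
    P_cond li cond = P_cond_alt li cond := by
  unfold P_cond P_cond_alt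
  simp only []
  by_cases h : PySem.Str.isIn "&" cond = true
  · simp only [h, if_pos]
    rw [specs_fold_eq (pvSplit cond "&") [], List.nil_append,
        foldl_pair_snd li (pvBStep li) (step_eq li) (pvSplit cond "&") (0, 0),
        ← gfold_flatMap li (pvSplit cond "&") 0]
    by_cases he : (pvSplit cond "&").flatMap pvSpec1 = []
    · rw [if_pos he, he]; rfl
    · rw [if_neg he]; rfl
  · simp only [h, Bool.false_eq_true, if_neg, not_false_eq_true]
    have h1 : (pvStepA li (0, 0) cond).2
        = (([cond] : List String).flatMap pvSpec1).foldl (pvGStep li) 0 := by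
      rw [gfold_flatMap li [cond] 0]
      simp only [List.foldl_cons, List.foldl_nil]
      exact step_eq li (0, 0) cond
    rw [specs_fold_eq [cond] [], List.nil_append, h1]
    by_cases he : ([cond] : List String).flatMap pvSpec1 = []
    · rw [if_pos he, he]; rfl
    · rw [if_neg he]; rfl

-- ===== VERDICT (by name: the statement is the Claim_ definition above) =====
theorem P_cond_spec : Claim_equal_P_cond := by
  intro li cond _ _
  unfold Spec_P_cond
  exact P_cond_eq_alt li cond
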